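-- pv_equiv track=rewrite | github.com/Farazulhaque/PythonCoding | Q42/filternumberfromstrings.py | filter_all_num_strings
-- ===== SOURCE A (Python) =====
-- def filter_all_num_strings(list_of_str):
--     List = []
--     # Iterate over all the elements of list
--     for i in list_of_str:
--         # Iterate over each letter of elements
--         for j in i:
--             if j in ['1', '2', '3', '4', '5', '6', '7', '8', '9', '0']:
--                 List.append(i)
--                 # If number in a word then append the word to a list and break this loop
--                 break
--     return List
-- ===== SOURCE B (Python) =====
-- _DELETE_DIGITS = str.maketrans('', '', '0123456789')
--
--
-- def filter_all_num_strings(list_of_str):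
--     # Remove every digit from the string; it contained a digit iff it got shorter.
--     return [s for s in list_of_str if len(s.translate(_DELETE_DIGITS)) < len(s)]
-- ===== Notes on version B (the rewrite author's own statement) =====
-- stated objective: alternative
-- what changed: Instead of scanning each string char-by-char for a digit and breaking on the first hit, B deletes all digits from each string with a str.translate deletion table and keeps the string iff the result is shorter; the search/break inner loop becomes a whole-string transformation plus a length comparison.
import Mathlib
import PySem

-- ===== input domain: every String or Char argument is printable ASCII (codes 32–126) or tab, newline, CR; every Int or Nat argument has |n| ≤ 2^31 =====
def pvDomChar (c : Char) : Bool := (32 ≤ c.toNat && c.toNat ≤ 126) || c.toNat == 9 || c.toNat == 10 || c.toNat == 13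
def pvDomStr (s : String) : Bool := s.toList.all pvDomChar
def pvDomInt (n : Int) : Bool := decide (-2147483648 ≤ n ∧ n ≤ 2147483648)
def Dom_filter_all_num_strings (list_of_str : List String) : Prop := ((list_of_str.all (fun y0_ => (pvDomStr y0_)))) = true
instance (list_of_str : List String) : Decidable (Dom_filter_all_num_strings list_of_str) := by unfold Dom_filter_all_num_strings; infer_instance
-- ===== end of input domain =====

-- B replaces A's digit-search with break by deleting all digits (str.translate) and keeping the string iff it got shorter (objective: alternative).

-- ===== PORT A =====
-- inner 'for j in i: if j in [...]: append; break' — true iff the break fires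
def pvHasDigitA : List Char → Bool
  | [] => false
  | c :: rest =>
      if c ∈ (['1', '2', '3', '4', '5', '6', '7', '8', '9', '0'] : List Char) then true
      else pvHasDigitA rest

def pvLoopA (acc : List String) : List String → List String
  | [] => acc
  | s :: rest => pvLoopA (if pvHasDigitA s.toList then acc ++ [s] else acc) rest

def filter_all_num_strings (list_of_str : List String) : List String :=
  pvLoopA [] list_of_str

-- ===== PORT B =====
-- s.translate(str.maketrans('', '', '0123456789')): delete every digit character
def pvDeleteDigits (l : List Char) : List Char :=
  l.filter (fun c => !("0123456789".toList.contains c))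

def filter_all_num_strings_alt (list_of_str : List String) : List String :=
  list_of_str.filter (fun s => (pvDeleteDigits s.toList).length < s.toList.length)

-- ===== PRECONDITION & SPEC =====
def Spec_filter_all_num_strings (list_of_str : List String) (out : List String) : Prop := out = filter_all_num_strings_alt list_of_str
instance (list_of_str : List String) (out : List String) : Decidable (Spec_filter_all_num_strings list_of_str out) := by unfold Spec_filter_all_num_strings; infer_instance

-- ===== CLAIM =====
def Claim_equal_filter_all_num_strings : Prop := ∀ (list_of_str : List String), Dom_filter_all_num_strings list_of_str → Spec_filter_all_num_strings list_of_str (filter_all_num_strings list_of_str)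

-- ===== LEMMAS AND PROOFS =====
theorem pvHasDigitA_iff (l : List Char) :
    pvHasDigitA l = true ↔ ∃ c ∈ l, c ∈ (['1', '2', '3', '4', '5', '6', '7', '8', '9', '0'] : List Char) := by
  induction l with
  | nil => simp [pvHasDigitA]
  | cons c rest ih =>
      by_cases h : c ∈ (['1', '2', '3', '4', '5', '6', '7', '8', '9', '0'] : List Char)
      · simp [pvHasDigitA, h]
        exact Or.inl (by simpa using h)
      · simp [pvHasDigitA, h, ih]
        intro hc
        exact absurd (by simpa using hc) h

-- deleting digits shortens the list iff some digit occurs in it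
theorem pred_eq (s : String) :
    pvHasDigitA s.toList = decide ((pvDeleteDigits s.toList).length < s.toList.length) := by
  rw [Bool.eq_iff_iff, pvHasDigitA_iff]
  simp only [decide_eq_true_eq, pvDeleteDigits]
  rw [List.length_filter_lt_length_iff_exists]
  constructor
  · rintro ⟨c, hc, hd⟩
    refine ⟨c, hc, ?_⟩
    fin_cases hd <;> decide
  · rintro ⟨c, hc, hm⟩
    refine ⟨c, hc, ?_⟩
    simp only [Bool.not_eq_true', Bool.not_eq_false, List.contains_iff_mem] at hm
    simp at hm ⊢
    tauto

theorem pvLoopA_eq (l acc : List String) :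
    pvLoopA acc l = acc ++ l.filter (fun s => (pvDeleteDigits s.toList).length < s.toList.length) := by
  induction l generalizing acc with
  | nil => simp [pvLoopA]
  | cons s rest ih =>
      rw [pvLoopA, ih, List.filter_cons]
      have h := pred_eq s
      by_cases hl : (pvDeleteDigits s.toList).length < s.length <;> simp [h, hl]

-- ===== VERDICT =====
theorem filter_all_num_strings_spec : Claim_equal_filter_all_num_strings := by
  intro l _
  unfold Spec_filter_all_num_strings filter_all_num_strings filter_all_num_strings_alt
  simpa using pvLoopA_eq l []
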